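-- pv_equiv track=rewrite | github.com/aznt00th/aoc2023 | day14/part1.py | compute
-- ===== SOURCE A (Python) =====
-- def compute(s: str) -> int:
--     lines = s.splitlines()
--     squares = [0] * len(lines[0])
--     rocks = [0] * len(lines[0])
--     total_rows = len(lines)
--     total_load = 0
--     for row_num, line in enumerate(lines):
--         for col_num, char in enumerate(line):
--             if char == '#':
--                 squares[col_num] = row_num + 1
--                 rocks[col_num] = 0
--             elif char == 'O':
--                 total_load += total_rows - squares[col_num] - rocks[col_num]
--                 rocks[col_num] += 1
--     return total_load
-- ===== SOURCE B (Python) =====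
-- def compute(s: str) -> int:
--     lines = s.splitlines()
--     total_rows = len(lines)
--     width = len(lines[0])
--     total = 0
--     for c in range(width):
--         start = 0   # first row of the current '#'-free segment of this column
--         k = 0       # 'O' rocks seen in the current segment
--         for r in range(total_rows):
--             ch = lines[r][c] if c < len(lines[r]) else '.'
--             if ch == '#':
--                 total += k * (total_rows - start) - k * (k - 1) // 2
--                 start = r + 1
--                 k = 0
--             elif ch == 'O':
--                 k += 1
--         total += k * (total_rows - start) - k * (k - 1) // 2
--     return total
-- ===== Notes on version B (the rewrite author's own statement) =====
-- stated objective: alternative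
-- what changed: Replaces A's row-major sweep with its per-column squares/rocks bookkeeping arrays by a column-major scan that treats each column as '#'-separated segments and adds every segment's rock load in closed form k*(T-start) - k*(k-1)//2.
import Mathlib
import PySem

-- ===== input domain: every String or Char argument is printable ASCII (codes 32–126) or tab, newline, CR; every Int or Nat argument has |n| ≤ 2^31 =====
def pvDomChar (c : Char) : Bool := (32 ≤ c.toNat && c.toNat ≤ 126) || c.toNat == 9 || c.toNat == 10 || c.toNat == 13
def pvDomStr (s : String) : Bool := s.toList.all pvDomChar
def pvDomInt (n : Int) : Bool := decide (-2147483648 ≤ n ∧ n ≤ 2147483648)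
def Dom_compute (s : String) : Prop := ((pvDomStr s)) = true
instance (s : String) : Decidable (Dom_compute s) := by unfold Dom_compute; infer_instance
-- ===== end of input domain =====

-- B replaces A's row-major sweep (with per-column squares/rocks bookkeeping arrays) by a
-- column-major scan that adds each '#'-free segment's load in closed form (objective: alternative).

-- ===== PORT A =====
-- inner loop 'for col_num, char in enumerate(line)'; where Python raises IndexError
-- ('#'/'O' at an index >= width) List.set/getD are no-ops/defaults -- exactly those
-- inputs are excluded by Pre_compute.
def innerA (T r : Int) : Nat → List Int → List Int → Int → List Char → List Int × List Int × Int
  | _, sq, rk, ld, [] => (sq, rk, ld)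
  | c, sq, rk, ld, ch :: rest =>
    if ch = '#' then innerA T r (c+1) (sq.set c (r+1)) (rk.set c 0) ld rest
    else if ch = 'O' then
      innerA T r (c+1) sq (rk.set c (rk.getD c 0 + 1)) (ld + T - sq.getD c 0 - rk.getD c 0) rest
    else innerA T r (c+1) sq rk ld rest

-- outer loop 'for row_num, line in enumerate(lines)'
def rowsA (T : Int) : Int → List Int × List Int × Int → List (List Char) → List Int × List Int × Int
  | _, st, [] => st
  | r, (sq, rk, ld), line :: rest => rowsA T (r+1) (innerA T r 0 sq rk ld line) rest

def compute (s : String) : Int :=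
  match (PySem.Str.splitlines s).map String.toList with
  | [] => 0  -- Python raises IndexError on 'lines[0]' (outside Pre_compute)
  | l0 :: rest =>
    let lines := l0 :: rest
    let W := l0.length
    (rowsA (lines.length : Int) 0 (List.replicate W 0, List.replicate W 0, 0) lines).2.2

-- ===== PORT B =====
-- per-column scan of Source B: 'start' = first row of the current '#'-free segment,
-- 'k' = rocks seen in it; on '#' (and at the end) the segment's load is added in
-- closed form k*(T-start) - k*(k-1)//2.
def colB (T : Int) : Int → Int → Int → Int → List Char → Int
  | _, start, k, total, [] => total + (k * (T - start) - PySem.Int.floordiv (k * (k - 1)) 2)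
  | r, start, k, total, ch :: rest =>
    if ch = '#' then
      colB T (r+1) (r+1) 0 (total + (k * (T - start) - PySem.Int.floordiv (k * (k - 1)) 2)) rest
    else if ch = 'O' then colB T (r+1) start (k+1) total rest
    else colB T (r+1) start k total rest

def compute_alt (s : String) : Int :=
  match (PySem.Str.splitlines s).map String.toList with
  | [] => 0  -- Python raises IndexError on 'len(lines[0])' (outside Pre_compute)
  | l0 :: rest =>
    let lines := l0 :: rest
    let T : Int := lines.length
    (List.range l0.length).foldl
      (fun total c =>
        colB T 0 0 0 total (lines.map (fun l => if c < l.length then l.getD c '.' else '.')))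
      0

-- ===== PRECONDITION & SPEC =====
-- Pre_compute holds exactly where Python A returns normally: at least one line
-- (else 'lines[0]' raises IndexError) and no '#'/'O' at a column index >= len(lines[0])
-- (there A's squares/rocks indexing raises IndexError).
def Pre_compute (s : String) : Prop :=
  PySem.Str.splitlines s ≠ [] ∧
  ((PySem.Str.splitlines s).all (fun line =>
     (line.toList.drop ((PySem.Str.splitlines s).headD "").toList.length).all
       (fun ch => !(ch == '#') && !(ch == 'O')))) = true
instance (s : String) : Decidable (Pre_compute s) := by unfold Pre_compute; infer_instance

def pvWitness_compute : String := "O.O\n#.O\nOO."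

def Spec_compute (s : String) (out : Int) : Prop := out = compute_alt s
instance (s : String) (out : Int) : Decidable (Spec_compute s out) := by
  unfold Spec_compute; infer_instance

-- ===== CLAIM (what is proved, stated in full; the proofs are below) =====
def Claim_equal_compute : Prop := ∀ (s : String), Dom_compute s → Pre_compute s → Spec_compute s (compute s)

-- ===== LEMMAS AND PROOFS =====

-- abstract per-column machine: state (squares, rocks, load) at row r
def oneCell (T r : Int) (p : Int × Int × Int) (ch : Char) : Int × Int × Int :=
  if ch = '#' then (r + 1, 0, p.2.2)
  else if ch = 'O' then (p.1, p.2.1 + 1, p.2.2 + T - p.1 - p.2.1)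
  else p

def colRun (T : Int) : Int → Int × Int × Int → List Char → Int × Int × Int
  | _, p, [] => p
  | r, p, ch :: rest => colRun T (r+1) (oneCell T r p ch) rest

lemma colRun_shift (T : Int) : ∀ (cs : List Char) (r a b x : Int),
    colRun T r (a, b, x) cs =
      ((colRun T r (a, b, 0) cs).1, (colRun T r (a, b, 0) cs).2.1,
        x + (colRun T r (a, b, 0) cs).2.2) := by
  intro cs
  induction cs with
  | nil => intro r a b x; simp [colRun]
  | cons ch rest ih =>
    intro r a b x
    simp only [colRun, oneCell]
    split_ifs with h1 h2
    · exact ih (r+1) (r+1) 0 x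
    · rw [ih (r+1) a (b+1) (x + T - a - b), ih (r+1) a (b+1) (0 + T - a - b)]
      simp; ring
    · exact ih (r+1) a b x

lemma innerA_spec (T r : Int) (W : Nat) :
    ∀ (line : List Char) (j : Nat) (sq rk : List Int) (ld : Int),
      sq.length = W → rk.length = W →
      (∀ i : Nat, W ≤ j + i → line.getD i '.' ≠ '#' ∧ line.getD i '.' ≠ 'O') →
      (innerA T r j sq rk ld line).1.length = W ∧
      (innerA T r j sq rk ld line).2.1.length = W ∧
      (∀ c : Nat, c < W →
        (innerA T r j sq rk ld line).1.getD c 0 =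
          (if c < j then sq.getD c 0
           else (oneCell T r (sq.getD c 0, rk.getD c 0, 0) (line.getD (c - j) '.')).1) ∧
        (innerA T r j sq rk ld line).2.1.getD c 0 =
          (if c < j then rk.getD c 0
           else (oneCell T r (sq.getD c 0, rk.getD c 0, 0) (line.getD (c - j) '.')).2.1)) ∧
      (innerA T r j sq rk ld line).2.2 =
        ld + ((List.range' j (W - j)).map
          (fun c => (oneCell T r (sq.getD c 0, rk.getD c 0, 0) (line.getD (c - j) '.')).2.2)).sum := by
  intro line
  induction line with
  | nil =>
    intro j sq rk ld hsq hrk _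
    refine ⟨hsq, hrk, ?_, ?_⟩
    · intro c hc
      constructor <;> simp [innerA, oneCell]
    · simp [innerA, oneCell]
  | cons ch rest ih =>
    intro j sq rk ld hsq hrk hok
    have hshift : ∀ i : Nat, W ≤ (j+1) + i → rest.getD i '.' ≠ '#' ∧ rest.getD i '.' ≠ 'O' := by
      intro i hi
      have := hok (i+1) (by omega)
      simpa using this
    by_cases hsharp : ch = '#'
    · have hjW : j < W := by
        by_contra h
        exact (hok 0 (by omega)).1 (by simpa [hsharp])
      subst hsharp
      have hsq' : (sq.set j (r+1)).length = W := by simpa using hsq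
      have hrk' : (rk.set j 0).length = W := by simpa using hrk
      obtain ⟨h1, h2, h3, h4⟩ := ih (j+1) (sq.set j (r+1)) (rk.set j 0) ld hsq' hrk' hshift
      have e : innerA T r j sq rk ld ('#' :: rest)
          = innerA T r (j+1) (sq.set j (r+1)) (rk.set j 0) ld rest := by
        simp [innerA]
      refine ⟨by rw [e]; exact h1, by rw [e]; exact h2, ?_, ?_⟩
      · intro c hc
        obtain ⟨g1, g2⟩ := h3 c hc
        rw [e]
        rcases lt_trichotomy c j with h | h | h
        · constructor
          · rw [g1, if_pos (by omega), if_pos h]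
            rw [List.getD_eq_getElem?_getD, List.getD_eq_getElem?_getD, List.getElem?_set,
              if_neg (by omega : ¬ j = c)]
          · rw [g2, if_pos (by omega), if_pos h]
            rw [List.getD_eq_getElem?_getD, List.getD_eq_getElem?_getD, List.getElem?_set,
              if_neg (by omega : ¬ j = c)]
        · subst h
          constructor
          · rw [g1, if_pos (by omega), if_neg (by omega)]
            simp [List.getD_eq_getElem?_getD, List.getElem?_set, hsq ▸ hjW, oneCell]
          · rw [g2, if_pos (by omega), if_neg (by omega)]
            simp [List.getD_eq_getElem?_getD, List.getElem?_set, hrk ▸ hjW, oneCell]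
        · have hcj : ¬ c < j := by omega
          have hgd : ∀ (L : List Int) (v : Int), (L.set j v).getD c 0 = L.getD c 0 := by
            intro L v
            rw [List.getD_eq_getElem?_getD, List.getD_eq_getElem?_getD, List.getElem?_set,
              if_neg (by omega : ¬ j = c)]
          have hrest : rest.getD (c - (j+1)) '.' = ('#' :: rest).getD (c - j) '.' := by
            have : c - j = (c - (j+1)) + 1 := by omega
            rw [this]; simp
          constructor
          · rw [g1, if_neg (by omega), if_neg hcj, hgd, hgd, hrest]
          · rw [g2, if_neg (by omega), if_neg hcj, hgd, hgd, hrest]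
      · rw [e, h4]
        have hsplit : List.range' j (W - j) = j :: List.range' (j+1) (W - (j+1)) := by
          have : W - j = (W - (j+1)) + 1 := by omega
          rw [this, List.range'_succ]
        rw [hsplit]
        simp only [List.map_cons, List.sum_cons]
        have hzero : (oneCell T r (sq.getD j 0, rk.getD j 0, 0) (('#' :: rest).getD (j - j) '.')).2.2 = 0 := by
          simp [oneCell]
        rw [hzero]
        have hcong : (List.range' (j+1) (W - (j+1))).map
            (fun c => (oneCell T r ((sq.set j (r+1)).getD c 0, (rk.set j 0).getD c 0, 0) (rest.getD (c - (j+1)) '.')).2.2)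
            = (List.range' (j+1) (W - (j+1))).map
            (fun c => (oneCell T r (sq.getD c 0, rk.getD c 0, 0) (('#' :: rest).getD (c - j) '.')).2.2) := by
          apply List.map_congr_left
          intro c hcmem
          have hcge : j + 1 ≤ c := (List.mem_range'_1.mp hcmem).1
          have hgd : ∀ (L : List Int) (v : Int), (L.set j v).getD c 0 = L.getD c 0 := by
            intro L v
            rw [List.getD_eq_getElem?_getD, List.getD_eq_getElem?_getD, List.getElem?_set,
              if_neg (by omega : ¬ j = c)]
          have hrest : rest.getD (c - (j+1)) '.' = ('#' :: rest).getD (c - j) '.' := by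
            have : c - j = (c - (j+1)) + 1 := by omega
            rw [this]; simp
          rw [hgd, hgd, hrest]
        rw [hcong]
        ring
    · by_cases hO : ch = 'O'
      · have hjW : j < W := by
          by_contra h
          exact (hok 0 (by omega)).2 (by simpa [hO])
        subst hO
        have hrk' : (rk.set j (rk.getD j 0 + 1)).length = W := by simpa using hrk
        obtain ⟨h1, h2, h3, h4⟩ := ih (j+1) sq (rk.set j (rk.getD j 0 + 1))
          (ld + T - sq.getD j 0 - rk.getD j 0) hsq hrk' hshift
        have e : innerA T r j sq rk ld ('O' :: rest)
            = innerA T r (j+1) sq (rk.set j (rk.getD j 0 + 1))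
                (ld + T - sq.getD j 0 - rk.getD j 0) rest := by
          simp [innerA]
        refine ⟨by rw [e]; exact h1, by rw [e]; exact h2, ?_, ?_⟩
        · intro c hc
          obtain ⟨g1, g2⟩ := h3 c hc
          rw [e]
          rcases lt_trichotomy c j with h | h | h
          · constructor
            · rw [g1, if_pos (by omega), if_pos h]
            · rw [g2, if_pos (by omega), if_pos h]
              rw [List.getD_eq_getElem?_getD, List.getD_eq_getElem?_getD, List.getElem?_set,
                if_neg (by omega : ¬ j = c), List.getD_eq_getElem?_getD]
          · subst h
            constructor
            · rw [g1, if_pos (by omega), if_neg (by omega)]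
              simp [oneCell]
            · rw [g2, if_pos (by omega), if_neg (by omega)]
              simp [List.getD_eq_getElem?_getD, List.getElem?_set, hrk ▸ hjW, oneCell]
          · have hcj : ¬ c < j := by omega
            have hgd : ∀ (v : Int), (rk.set j v).getD c 0 = rk.getD c 0 := by
              intro v
              rw [List.getD_eq_getElem?_getD, List.getD_eq_getElem?_getD, List.getElem?_set,
                if_neg (by omega : ¬ j = c)]
            have hrest : rest.getD (c - (j+1)) '.' = ('O' :: rest).getD (c - j) '.' := by
              have : c - j = (c - (j+1)) + 1 := by omega
              rw [this]; simp
            constructor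
            · rw [g1, if_neg (by omega), if_neg hcj, hgd, hrest]
            · rw [g2, if_neg (by omega), if_neg hcj, hgd, hrest]
        · rw [e, h4]
          have hsplit : List.range' j (W - j) = j :: List.range' (j+1) (W - (j+1)) := by
            have : W - j = (W - (j+1)) + 1 := by omega
            rw [this, List.range'_succ]
          rw [hsplit]
          simp only [List.map_cons, List.sum_cons]
          have hj : (oneCell T r (sq.getD j 0, rk.getD j 0, 0) (('O' :: rest).getD (j - j) '.')).2.2
              = 0 + T - sq.getD j 0 - rk.getD j 0 := by
            simp [oneCell]
          rw [hj]
          have hcong : (List.range' (j+1) (W - (j+1))).map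
              (fun c => (oneCell T r (sq.getD c 0, (rk.set j (rk.getD j 0 + 1)).getD c 0, 0) (rest.getD (c - (j+1)) '.')).2.2)
              = (List.range' (j+1) (W - (j+1))).map
              (fun c => (oneCell T r (sq.getD c 0, rk.getD c 0, 0) (('O' :: rest).getD (c - j) '.')).2.2) := by
            apply List.map_congr_left
            intro c hcmem
            have hcge : j + 1 ≤ c := (List.mem_range'_1.mp hcmem).1
            have hgd : ∀ (v : Int), (rk.set j v).getD c 0 = rk.getD c 0 := by
              intro v
              rw [List.getD_eq_getElem?_getD, List.getD_eq_getElem?_getD, List.getElem?_set,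
                if_neg (by omega : ¬ j = c)]
            have hrest : rest.getD (c - (j+1)) '.' = ('O' :: rest).getD (c - j) '.' := by
              have : c - j = (c - (j+1)) + 1 := by omega
              rw [this]; simp
            rw [hgd, hrest]
          rw [hcong]
          ring
      · obtain ⟨h1, h2, h3, h4⟩ := ih (j+1) sq rk ld hsq hrk hshift
        have e : innerA T r j sq rk ld (ch :: rest) = innerA T r (j+1) sq rk ld rest := by
          simp [innerA, hsharp, hO]
        refine ⟨by rw [e]; exact h1, by rw [e]; exact h2, ?_, ?_⟩
        · intro c hc
          obtain ⟨g1, g2⟩ := h3 c hc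
          rw [e]
          rcases lt_trichotomy c j with h | h | h
          · constructor
            · rw [g1, if_pos (by omega), if_pos h]
            · rw [g2, if_pos (by omega), if_pos h]
          · subst h
            constructor
            · rw [g1, if_pos (by omega), if_neg (by omega)]
              simp [oneCell, hsharp, hO]
            · rw [g2, if_pos (by omega), if_neg (by omega)]
              simp [oneCell, hsharp, hO]
          · have hrest : rest.getD (c - (j+1)) '.' = (ch :: rest).getD (c - j) '.' := by
              have : c - j = (c - (j+1)) + 1 := by omega
              rw [this]; simp
            constructor
            · rw [g1, if_neg (by omega), if_neg (by omega), hrest]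
            · rw [g2, if_neg (by omega), if_neg (by omega), hrest]
        · rw [e, h4]
          by_cases hjW : j < W
          · have hsplit : List.range' j (W - j) = j :: List.range' (j+1) (W - (j+1)) := by
              have : W - j = (W - (j+1)) + 1 := by omega
              rw [this, List.range'_succ]
            rw [hsplit]
            simp only [List.map_cons, List.sum_cons]
            have hj : (oneCell T r (sq.getD j 0, rk.getD j 0, 0) ((ch :: rest).getD (j - j) '.')).2.2 = 0 := by
              simp [oneCell, hsharp, hO]
            rw [hj]
            have hcong : (List.range' (j+1) (W - (j+1))).map
                (fun c => (oneCell T r (sq.getD c 0, rk.getD c 0, 0) (rest.getD (c - (j+1)) '.')).2.2)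
                = (List.range' (j+1) (W - (j+1))).map
                (fun c => (oneCell T r (sq.getD c 0, rk.getD c 0, 0) ((ch :: rest).getD (c - j) '.')).2.2) := by
              apply List.map_congr_left
              intro c hcmem
              have hcge : j + 1 ≤ c := (List.mem_range'_1.mp hcmem).1
              have hrest : rest.getD (c - (j+1)) '.' = (ch :: rest).getD (c - j) '.' := by
                have : c - j = (c - (j+1)) + 1 := by omega
                rw [this]; simp
              rw [hrest]
            rw [hcong]
            ring
          · have e1 : W - j = 0 := by omega
            have e2 : W - (j+1) = 0 := by omega
            rw [e1, e2]
            simp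

lemma rowsA_spec (T : Int) (W : Nat) :
    ∀ (lines : List (List Char)) (r : Int) (sq rk : List Int) (ld : Int),
      sq.length = W → rk.length = W →
      (∀ l ∈ lines, ∀ i : Nat, W ≤ i → l.getD i '.' ≠ '#' ∧ l.getD i '.' ≠ 'O') →
      (rowsA T r (sq, rk, ld) lines).1.length = W ∧
      (rowsA T r (sq, rk, ld) lines).2.1.length = W ∧
      (∀ c : Nat, c < W →
        (rowsA T r (sq, rk, ld) lines).1.getD c 0 =
          (colRun T r (sq.getD c 0, rk.getD c 0, 0) (lines.map (fun l => l.getD c '.'))).1 ∧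
        (rowsA T r (sq, rk, ld) lines).2.1.getD c 0 =
          (colRun T r (sq.getD c 0, rk.getD c 0, 0) (lines.map (fun l => l.getD c '.'))).2.1) ∧
      (rowsA T r (sq, rk, ld) lines).2.2 =
        ld + ((List.range W).map
          (fun c => (colRun T r (sq.getD c 0, rk.getD c 0, 0)
                      (lines.map (fun l => l.getD c '.'))).2.2)).sum := by
  intro lines
  induction lines with
  | nil =>
    intro r sq rk ld hsq hrk _
    refine ⟨hsq, hrk, ?_, ?_⟩ <;> simp [rowsA, colRun]
  | cons line rest ih =>
    intro r sq rk ld hsq hrk hok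
    have hline : ∀ i : Nat, W ≤ 0 + i → line.getD i '.' ≠ '#' ∧ line.getD i '.' ≠ 'O' := by
      intro i hi; exact hok line (by simp) i (by omega)
    obtain ⟨i1, i2, i3, i4⟩ := innerA_spec T r W line 0 sq rk ld hsq hrk hline
    have hrest : ∀ l ∈ rest, ∀ i : Nat, W ≤ i → l.getD i '.' ≠ '#' ∧ l.getD i '.' ≠ 'O' := by
      intro l hl; exact hok l (by simp [hl])
    obtain ⟨j1, j2, j3, j4⟩ := ih (r+1) (innerA T r 0 sq rk ld line).1
      (innerA T r 0 sq rk ld line).2.1 (innerA T r 0 sq rk ld line).2.2 i1 i2 hrest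
    have e : rowsA T r (sq, rk, ld) (line :: rest)
        = rowsA T (r+1) ((innerA T r 0 sq rk ld line).1, (innerA T r 0 sq rk ld line).2.1,
            (innerA T r 0 sq rk ld line).2.2) rest := by
      simp [rowsA]
    -- per-column: one step of colRun
    have hstep : ∀ c : Nat, c < W →
        colRun T r (sq.getD c 0, rk.getD c 0, 0) ((line :: rest).map (fun l => l.getD c '.'))
          = ((colRun T (r+1) ((innerA T r 0 sq rk ld line).1.getD c 0,
                (innerA T r 0 sq rk ld line).2.1.getD c 0, 0)
                (rest.map (fun l => l.getD c '.'))).1,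
             (colRun T (r+1) ((innerA T r 0 sq rk ld line).1.getD c 0,
                (innerA T r 0 sq rk ld line).2.1.getD c 0, 0)
                (rest.map (fun l => l.getD c '.'))).2.1,
             (oneCell T r (sq.getD c 0, rk.getD c 0, 0) (line.getD c '.')).2.2 +
             (colRun T (r+1) ((innerA T r 0 sq rk ld line).1.getD c 0,
                (innerA T r 0 sq rk ld line).2.1.getD c 0, 0)
                (rest.map (fun l => l.getD c '.'))).2.2) := by
      intro c hc
      obtain ⟨g1, g2⟩ := i3 c hc
      rw [List.map_cons]
      show colRun T (r+1) (oneCell T r (sq.getD c 0, rk.getD c 0, 0) (line.getD c '.'))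
          (rest.map (fun l => l.getD c '.')) = _
      rw [g1, g2]
      simp only [if_neg (by omega : ¬ c < 0), Nat.sub_zero]
      have : oneCell T r (sq.getD c 0, rk.getD c 0, 0) (line.getD c '.')
          = ((oneCell T r (sq.getD c 0, rk.getD c 0, 0) (line.getD c '.')).1,
             (oneCell T r (sq.getD c 0, rk.getD c 0, 0) (line.getD c '.')).2.1,
             (oneCell T r (sq.getD c 0, rk.getD c 0, 0) (line.getD c '.')).2.2) := rfl
      rw [this, colRun_shift]
    refine ⟨by rw [e]; exact j1, by rw [e]; exact j2, ?_, ?_⟩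
    · intro c hc
      obtain ⟨g1, g2⟩ := j3 c hc
      rw [e]
      constructor
      · rw [g1, hstep c hc]
      · rw [g2, hstep c hc]
    · rw [e, j4, i4]
      have hr0 : List.range' 0 (W - 0) = List.range W := by
        rw [Nat.sub_zero, List.range_eq_range']
      rw [hr0]
      have hcong : (List.range W).map
          (fun c => (colRun T r (sq.getD c 0, rk.getD c 0, 0)
                      ((line :: rest).map (fun l => l.getD c '.'))).2.2)
          = (List.range W).map
          (fun c => (oneCell T r (sq.getD c 0, rk.getD c 0, 0) (line.getD c '.')).2.2 +
              (colRun T (r+1) ((innerA T r 0 sq rk ld line).1.getD c 0,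
                (innerA T r 0 sq rk ld line).2.1.getD c 0, 0)
                (rest.map (fun l => l.getD c '.'))).2.2) := by
        apply List.map_congr_left
        intro c hcmem
        rw [hstep c (List.mem_range.mp hcmem)]
      rw [hcong, PySem.List.sum_map_add_int]
      simp only [Nat.sub_zero]
      ring

lemma floordiv_step (k : Int) (hk : 0 ≤ k) :
    PySem.Int.floordiv ((k+1) * k) 2 = PySem.Int.floordiv (k * (k - 1)) 2 + k := by
  rw [PySem.Int.floordiv_eq_ediv_of_pos (by norm_num), PySem.Int.floordiv_eq_ediv_of_pos (by norm_num)]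
  have : (k+1) * k = k * (k-1) + k * 2 := by ring
  rw [this, Int.add_mul_ediv_right _ _ (by norm_num)]

lemma colB_spec (T : Int) : ∀ (cs : List Char) (r start k total : Int), 0 ≤ k →
    colB T r start k total cs =
      total + (k * (T - start) - PySem.Int.floordiv (k * (k - 1)) 2) +
        (colRun T r (start, k, 0) cs).2.2 := by
  intro cs
  induction cs with
  | nil => intro r start k total hk; simp [colB, colRun]
  | cons ch rest ih =>
    intro r start k total hk
    simp only [colB, colRun, oneCell]
    split_ifs with h1 h2
    · rw [ih (r+1) (r+1) 0 _ le_rfl]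
      have h0 : PySem.Int.floordiv ((0:Int) * (0-1)) 2 = 0 := by
        rw [PySem.Int.floordiv_eq_ediv_of_pos (by norm_num)]; norm_num
      simp [h0]
    · rw [ih (r+1) start (k+1) total (by omega)]
      rw [colRun_shift T rest (r+1) start (k+1) (0 + T - start - k)]
      have hfd := floordiv_step k hk
      have h2' : (k+1) * (k + 1 - 1) = (k+1) * k := by ring
      rw [h2', hfd]
      ring
    · exact ih (r+1) start k total hk

lemma getD_if_eq (c : Nat) (l : List Char) :
    (if c < l.length then l.getD c '.' else '.') = l.getD c '.' := by
  by_cases h : c < l.length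
  · rw [if_pos h]
  · rw [if_neg h, List.getD_eq_default _ _ (by omega)]

lemma foldl_add_eq (f : Nat → Int) : ∀ (l : List Nat) (a : Int),
    l.foldl (fun t c => t + f c) a = a + (l.map f).sum := by
  intro l
  induction l with
  | nil => intro a; simp
  | cons x xs ih => intro a; simp [List.foldl_cons, ih]; ring

lemma pre_to_forall (s : String) (h : Pre_compute s) :
    ∀ line ∈ PySem.Str.splitlines s,
      ∀ ch ∈ line.toList.drop ((PySem.Str.splitlines s).headD "").toList.length,
        ch ≠ '#' ∧ ch ≠ 'O' := by
  obtain ⟨_, h2⟩ := h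
  intro line hline ch hch
  have h3 := List.all_eq_true.mp h2 line hline
  have h4 := List.all_eq_true.mp h3 ch hch
  constructor <;> · intro he; subst he; simp at h4

theorem compute_spec' : ∀ (s : String), Pre_compute s → compute s = compute_alt s := by
  intro s hpre
  have hne := hpre.1
  have hP := pre_to_forall s hpre
  obtain ⟨l0, rest, hs⟩ := List.exists_cons_of_ne_nil hne
  have hmap : (PySem.Str.splitlines s).map String.toList
      = l0.toList :: rest.map String.toList := by rw [hs, List.map_cons]
  set W := l0.toList.length with hWdef
  set LL := l0.toList :: rest.map String.toList with hLL
  set T : Int := (LL.length : Int) with hT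
  have hok : ∀ l ∈ LL, ∀ i : Nat, W ≤ i → l.getD i '.' ≠ '#' ∧ l.getD i '.' ≠ 'O' := by
    intro l hl i hi
    have : ∃ line ∈ PySem.Str.splitlines s, line.toList = l := by
      rw [hs]
      rw [hLL] at hl
      rcases List.mem_cons.mp hl with h | h
      · exact ⟨l0, by simp, by rw [h]⟩
      · obtain ⟨line, hline, hline2⟩ := List.mem_map.mp h
        exact ⟨line, by simp [hline], hline2⟩
    obtain ⟨line, hline, rfl⟩ := this
    by_cases hlen : i < line.toList.length
    · have hget : line.toList.getD i '.' = line.toList[i] := List.getD_eq_getElem _ _ hlen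
      have hdrop : line.toList[i] ∈ line.toList.drop W := by
        have hidx : W + (i - W) < line.toList.length := by omega
        have : (line.toList.drop W)[i - W]' (by rw [List.length_drop]; omega) = line.toList[i] := by
          rw [List.getElem_drop]
          congr 1
          omega
        rw [← this]
        exact List.getElem_mem _
      have := hP line hline (line.toList[i]) (by
        rw [hs]
        simp only [List.headD_cons]
        rw [← hWdef]
        exact hdrop)
      rw [hget]
      exact this
    · rw [List.getD_eq_default _ _ (by omega)]
      exact ⟨by decide, by decide⟩
  have hA : compute s
      = ((List.range W).map
          (fun c => (colRun T 0 (0, 0, 0) (LL.map (fun l => l.getD c '.'))).2.2)).sum := by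
    show (match (PySem.Str.splitlines s).map String.toList with
      | [] => (0:Int)
      | l0 :: rest =>
        (rowsA ((l0::rest).length : Int) 0
          (List.replicate l0.length 0, List.replicate l0.length 0, 0) (l0::rest)).2.2) = _
    rw [hmap]
    obtain ⟨_, _, _, h4⟩ := rowsA_spec T W LL 0 (List.replicate W 0) (List.replicate W 0) 0
      (by simp) (by simp) hok
    rw [hLL] at h4
    simp only [hT, hLL] at h4 ⊢
    rw [h4]
    have : ∀ c ∈ List.range W, ((List.replicate W (0:Int)).getD c 0 = 0) := by
      intro c hc
      simp [List.getD_eq_getElem?_getD, List.getElem?_replicate, List.mem_range.mp hc]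
    rw [List.map_congr_left (fun c hc => by rw [this c hc])]
    simp
  have hB : compute_alt s
      = ((List.range W).map
          (fun c => (colRun T 0 (0, 0, 0) (LL.map (fun l => l.getD c '.'))).2.2)).sum := by
    show (match (PySem.Str.splitlines s).map String.toList with
      | [] => (0:Int)
      | l0 :: rest =>
        (List.range l0.length).foldl
          (fun (total : Int) (c : Nat) =>
            colB ((l0::rest).length : Int) 0 0 0 total
              ((l0::rest).map (fun (l : List Char) => if c < l.length then l.getD c '.' else '.')))
          0) = _
    rw [hmap]
    have hbody : (fun (total : Int) (c : Nat) =>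
        colB T 0 0 0 total (LL.map (fun l => if c < l.length then l.getD c '.' else '.')))
        = (fun total c => total +
            (colRun T 0 (0, 0, 0) (LL.map (fun l => l.getD c '.'))).2.2) := by
      funext total c
      have hcol : LL.map (fun l => if c < l.length then l.getD c '.' else '.')
          = LL.map (fun l => l.getD c '.') :=
        List.map_congr_left (fun l _ => getD_if_eq c l)
      rw [hcol, colB_spec T _ 0 0 0 total le_rfl]
      have h0 : PySem.Int.floordiv ((0:Int) * (0 - 1)) 2 = 0 := by
        rw [PySem.Int.floordiv_eq_ediv_of_pos (by norm_num)]; norm_num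
      rw [h0]
      ring
    simp only [hT, hLL] at hbody ⊢
    rw [hbody, foldl_add_eq]
    simp
    rfl
  rw [hA, hB]


-- ===== VERDICT (by name: the statement is the Claim_ definition above) =====
theorem compute_spec : Claim_equal_compute := by
  intro s _ hpre
  unfold Spec_compute
  exact compute_spec' s hpre
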